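-- pv_equiv track=rewrite | github.com/EyeDeck/Advent-of-Code | AoC2022/aoc.py | frombits
-- ===== SOURCE A (Python) =====
-- def frombits(x, bitlen=None):
--     """Build a list of bools from a bitmask (little-endian).  If `bitlen` is
--     set, the output list will have length `bitlen` (otherwise, it will be just
--     long enough to contain every `1` bit."""
--     if bitlen:
--         return [bool(x & (1 << i)) for i in range(bitlen)]
--     else:
--         assert x >= 0
--         bs = []
--         while x != 0:
--             bs.append(bool(x & 1))
--             x >>= 1
--         return bs
-- ===== SOURCE B (Python) =====
-- def frombits(x, bitlen=None):
--     """Build a list of bools from a bitmask (little-endian); single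
--     comprehension, with the length computed up front via bit_length()."""
--     if not bitlen:
--         assert x >= 0
--         bitlen = x.bit_length()
--     return [bool(x & (1 << i)) for i in range(bitlen)]
-- ===== Notes on version B (the rewrite author's own statement) =====
-- stated objective: simpler
-- what changed: Replaces A's two-branch shape (comprehension vs. append/shift while-loop) by computing the output length first (given bitlen, else x.bit_length()) and emitting one bit-test comprehension for all cases.
import Mathlib
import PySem

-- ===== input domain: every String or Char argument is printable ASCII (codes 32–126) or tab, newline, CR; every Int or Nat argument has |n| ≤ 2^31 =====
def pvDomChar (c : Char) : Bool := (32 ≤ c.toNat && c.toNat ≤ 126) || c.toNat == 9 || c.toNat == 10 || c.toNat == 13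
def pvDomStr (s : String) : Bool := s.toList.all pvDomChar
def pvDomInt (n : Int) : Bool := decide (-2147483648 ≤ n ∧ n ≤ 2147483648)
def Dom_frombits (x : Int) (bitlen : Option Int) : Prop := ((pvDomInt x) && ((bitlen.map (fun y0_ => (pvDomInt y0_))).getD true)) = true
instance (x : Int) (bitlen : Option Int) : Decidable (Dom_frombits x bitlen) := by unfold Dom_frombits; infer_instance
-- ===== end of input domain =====

-- B computes the output length first and uses one bit-test comprehension for all
-- cases, replacing A's separate append/shift while-loop branch (objective: simpler).

-- ===== PORT A =====
-- the while-loop of A's else-branch: while x != 0: bs.append(bool(x & 1)); x >>= 1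
-- (reached only with x ≥ 0 thanks to the assert, where 'x != 0' is '0 < x')
-- bool(x & (1 << i)) — shared literal rendering of the comprehension body
def pyBit (x : Int) (i : Nat) : Bool := decide (PySem.Int.band x ((1:Int) <<< i) ≠ 0)

def frombitsLoop (x : Int) : List Bool :=
  if 0 < x then
    decide (PySem.Int.band x 1 ≠ 0) :: frombitsLoop (x >>> (1:Nat))
  else []
termination_by x.toNat
decreasing_by
  have h2 : x >>> (1:Nat) = x / 2 := by
    simpa using Int.shiftRight_eq_div_pow x 1
  omega

def frombits (x : Int) (bitlen : Option Int) : List Bool :=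
  -- if bitlen: (truthy = not None and ≠ 0)
  match bitlen with
  | some b =>
    if b ≠ 0 then
      (PySem.List.pyRange 0 b 1).map (fun i => pyBit x i.toNat)
    else
      if 0 ≤ x then frombitsLoop x else []   -- assert x >= 0 (AssertionError outside Pre_)
  | none =>
      if 0 ≤ x then frombitsLoop x else []   -- assert x >= 0 (AssertionError outside Pre_)

-- ===== PORT B =====
def frombits_alt (x : Int) (bitlen : Option Int) : List Bool :=
  -- if not bitlen: assert x >= 0; bitlen = x.bit_length()
  let n : Int := match bitlen with
    | some b => if b ≠ 0 then b else (PySem.Int.bitLength x : Int)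
    | none => (PySem.Int.bitLength x : Int)
  (PySem.List.pyRange 0 n 1).map (fun i => pyBit x i.toNat)

-- ===== PRECONDITION & SPEC =====
-- Pre_ excludes only the inputs where A raises AssertionError: negative x with a
-- falsy bitlen (None or 0).
def Pre_frombits (x : Int) (bitlen : Option Int) : Prop :=
  (bitlen = none ∨ bitlen = some 0) → 0 ≤ x
instance (x : Int) (bitlen : Option Int) : Decidable (Pre_frombits x bitlen) := by unfold Pre_frombits; infer_instance
def pvWitness_frombits : Int × Option Int := (13, none)

def Spec_frombits (x : Int) (bitlen : Option Int) (out : List Bool) : Prop := out = frombits_alt x bitlen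
instance (x : Int) (bitlen : Option Int) (out : List Bool) : Decidable (Spec_frombits x bitlen out) := by unfold Spec_frombits; infer_instance

-- ===== CLAIM (what is proved, stated in full; the proofs are below) =====
def Claim_equal_frombits : Prop := ∀ (x : Int) (bitlen : Option Int), Dom_frombits x bitlen → Pre_frombits x bitlen → Spec_frombits x bitlen (frombits x bitlen)

-- ===== LEMMAS AND PROOFS =====

-- the bit-test of the comprehensions, on a nonnegative x, is Nat.testBit
theorem band_shl_testBit (m i : Nat) :
    pyBit (m:Int) i = m.testBit i := by
  unfold pyBit
  have h1 : ((1:Int) <<< i) = (((2^i : Nat)) : Int) := by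
    simp [Int.shiftLeft_eq]
  simp only [h1, PySem.Int.band, if_pos (by positivity : (0:Int) ≤ ((2^i:Nat):Int)),
    if_pos (Int.natCast_nonneg m), Int.toNat_natCast, Nat.and_two_pow]
  simp [Bool.toNat_eq_zero]

-- A's while-loop lists exactly the bits 0 .. bit_length-1, little-endian
theorem frombitsLoop_eq (n : Nat) :
    frombitsLoop (n : Int) = (List.range (PySem.Int.bitLength (n:Int))).map n.testBit := by
  induction n using Nat.strong_induction_on with
  | _ n ih =>
    rcases Nat.eq_zero_or_pos n with h0 | h0
    · subst h0
      rw [frombitsLoop]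
      simp [PySem.Int.bitLength_zero]
    · rw [frombitsLoop, if_pos (by exact_mod_cast h0 : (0:Int) < (n:Int))]
      have hshift : ((n:Int) >>> (1:Nat)) = ((n / 2 : Nat) : Int) := by
        rw [← Int.natCast_shiftRight]
        norm_num [Nat.shiftRight_eq_div_pow]

      rw [hshift, ih (n / 2) (Nat.div_lt_self h0 one_lt_two),
        PySem.Int.bitLength_natCast h0, List.range_succ_eq_map]
      have hhead : (decide (PySem.Int.band (n:Int) 1 ≠ 0)) = n.testBit 0 := by
        simpa [pyBit] using band_shl_testBit n 0
      simp only [List.map_cons, List.map_map, hhead]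
      congr 1
      apply List.map_congr_left
      intro k _
      simp [Nat.testBit_add_one]

-- both comprehensions over range(m) compute the same list of testBits (x = n ≥ 0)
theorem comp_eq_testBits (n m : Nat) :
    (PySem.List.pyRange 0 (m:Int) 1).map (fun i => pyBit (n:Int) i.toNat)
      = (List.range m).map n.testBit := by
  rw [PySem.List.pyRange_zero_nat, List.map_map]
  apply List.map_congr_left
  intro k _
  simpa using band_shl_testBit n k

-- ===== VERDICT (by name: the statement is the Claim_ definition above) =====
theorem frombits_spec : Claim_equal_frombits := by
  intro x bitlen _ hpre
  unfold Spec_frombits frombits frombits_alt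
  have key : ∀ hx : 0 ≤ x,
      (if 0 ≤ x then frombitsLoop x else [])
        = (PySem.List.pyRange 0 ((PySem.Int.bitLength x : Nat) : Int) 1).map
            (fun i => pyBit x i.toNat) := by
    intro hx
    obtain ⟨n, rfl⟩ := Int.eq_ofNat_of_zero_le hx
    rw [if_pos hx, comp_eq_testBits, frombitsLoop_eq]
  match bitlen with
  | none => simpa using key (hpre (Or.inl rfl))
  | some b =>
    by_cases hb : b = 0
    · subst hb
      simpa using key (hpre (Or.inr rfl))
    · simp [hb]
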